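-- pv_equiv track=rewrite | github.com/coleoguy/SCARAB | TOB/scripts/goat_build_outputs.py | infer_project
-- ===== SOURCE A (Python) =====
-- PREFIX_TO_PROJECT = {
--     "icActS": "DToL", "icAcuD": "DToL",
--     "ic": "DToL",
--     "il": "DToL",
--     "id": "DToL",
--     "ia": "DToL",
--     "iy": "DToL",
--     "dr": "ERGA",
--     "bge": "ERGA-BGE",
--     "ds": "ERGA",
--     "xb": "ERGA",
--     "ag": "Ag100Pest",
--     "aag": "Ag100Pest",
-- }
--
-- def infer_project(assembly_name):
--     if not assembly_name:
--         return "unknown"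
--     name_lower = assembly_name.lower()
--     for prefix in sorted(PREFIX_TO_PROJECT.keys(), key=len, reverse=True):
--         if name_lower.startswith(prefix):
--             return PREFIX_TO_PROJECT[prefix]
--     if "ebp" in name_lower:
--         return "EBP"
--     return "unknown"
-- ===== SOURCE B (Python) =====
-- PREFIX_TO_PROJECT = {
--     "icActS": "DToL", "icAcuD": "DToL",
--     "ic": "DToL",
--     "il": "DToL",
--     "id": "DToL",
--     "ia": "DToL",
--     "iy": "DToL",
--     "dr": "ERGA",
--     "bge": "ERGA-BGE",
--     "ds": "ERGA",
--     "xb": "ERGA",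
--     "ag": "Ag100Pest",
--     "aag": "Ag100Pest",
-- }
--
-- _MAX_KEY_LEN = max(map(len, PREFIX_TO_PROJECT))
--
--
-- def infer_project(assembly_name):
--     if not assembly_name:
--         return "unknown"
--     name_lower = assembly_name.lower()
--     for L in range(min(len(name_lower), _MAX_KEY_LEN), 0, -1):
--         hit = PREFIX_TO_PROJECT.get(name_lower[:L])
--         if hit is not None:
--             return hit
--     if "ebp" in name_lower:
--         return "EBP"
--     return "unknown"
-- ===== Notes on version B (the rewrite author's own statement) =====
-- stated objective: alternative
-- what changed: B drops the length-sorted scan of the table: it probes the dict with the query's own prefixes from longest (capped at the longest key length) down to 1, returning on the first dict hit, so longest-prefix match is descending-length lookups of the input instead of a sorted startswith scan of the keys.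
import Mathlib
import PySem

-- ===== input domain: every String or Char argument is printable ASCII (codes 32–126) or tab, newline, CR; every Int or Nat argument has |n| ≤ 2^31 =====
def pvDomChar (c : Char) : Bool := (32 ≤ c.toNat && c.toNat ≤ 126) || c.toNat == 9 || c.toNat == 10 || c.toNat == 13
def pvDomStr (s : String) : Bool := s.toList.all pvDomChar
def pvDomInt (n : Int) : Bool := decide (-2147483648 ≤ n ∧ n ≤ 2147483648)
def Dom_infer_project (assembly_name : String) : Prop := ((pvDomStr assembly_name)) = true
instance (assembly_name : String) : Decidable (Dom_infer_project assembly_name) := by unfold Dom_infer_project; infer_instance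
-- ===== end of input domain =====

-- B replaces A's length-sorted startswith scan of the prefix table by descending-length
-- dict probes of the query's own prefixes (objective: alternative decomposition, same result).

-- ===== PORT A =====
-- PREFIX_TO_PROJECT (module constant); strings are represented as List Char throughout
def pvTable : PySem.Dict (List Char) String := PySem.Dict.ofList
  [("icActS".toList,"DToL"), ("icAcuD".toList,"DToL"), ("ic".toList,"DToL"),
   ("il".toList,"DToL"), ("id".toList,"DToL"), ("ia".toList,"DToL"), ("iy".toList,"DToL"),
   ("dr".toList,"ERGA"), ("bge".toList,"ERGA-BGE"), ("ds".toList,"ERGA"), ("xb".toList,"ERGA"),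
   ("ag".toList,"Ag100Pest"), ("aag".toList,"Ag100Pest")]

-- A's for-loop with early return: first sorted key that name_lower starts with
def pvAScan (nl : List Char) : List (List Char) → Option String
  | [] => none
  | p :: rest => if PySem.Chars.startswith nl p then pvTable.get? p else pvAScan nl rest

def infer_project (assembly_name : String) : String :=
  if assembly_name.toList = [] then "unknown"
  else
    let nl := PySem.Chars.lower assembly_name.toList
    match pvAScan nl (PySem.List.sorted pvTable.keys (fun p => p.length) true) with
    | some v => v
    | none => if PySem.Chars.isIn "ebp".toList nl then "EBP" else "unknown"

-- ===== PORT B =====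
-- _MAX_KEY_LEN = max(map(len, PREFIX_TO_PROJECT))
def pvMaxKeyLen : Nat := (pvTable.keys.map List.length).foldl Nat.max 0

-- B's for-loop over L = min(len, _MAX_KEY_LEN) .. 1: first dict hit on name_lower[:L]
def pvBProbe (nl : List Char) : List Int → Option String
  | [] => none
  | L :: rest =>
    match pvTable.get? (PySem.List.slice nl none (some L)) with
    | some v => some v
    | none => pvBProbe nl rest

def infer_project_alt (assembly_name : String) : String :=
  if assembly_name.toList = [] then "unknown"
  else
    let nl := PySem.Chars.lower assembly_name.toList
    match pvBProbe nl (PySem.List.pyRange (min (nl.length : Int) (pvMaxKeyLen : Int)) 0 (-1)) with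
    | some v => v
    | none => if PySem.Chars.isIn "ebp".toList nl then "EBP" else "unknown"

-- ===== PRECONDITION & SPEC =====
def Spec_infer_project (assembly_name : String) (out : String) : Prop := out = infer_project_alt assembly_name
instance (assembly_name : String) (out : String) : Decidable (Spec_infer_project assembly_name out) := by unfold Spec_infer_project; infer_instance

-- ===== CLAIM (what is proved, stated in full; the proofs are below) =====
def Claim_equal_infer_project : Prop := ∀ (assembly_name : String), Dom_infer_project assembly_name → Spec_infer_project assembly_name (infer_project assembly_name)

-- ===== LEMMAS AND PROOFS =====

lemma pvTable_eq : pvTable = PySem.Dict.mk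
  [("icActS".toList,"DToL"), ("icAcuD".toList,"DToL"), ("ic".toList,"DToL"),
   ("il".toList,"DToL"), ("id".toList,"DToL"), ("ia".toList,"DToL"), ("iy".toList,"DToL"),
   ("dr".toList,"ERGA"), ("bge".toList,"ERGA-BGE"), ("ds".toList,"ERGA"), ("xb".toList,"ERGA"),
   ("ag".toList,"Ag100Pest"), ("aag".toList,"Ag100Pest")] := by decide

lemma get?_mk_nil (k : List Char) : (PySem.Dict.mk ([] : List (List Char × String))).get? k = none := rfl

-- sorted(PREFIX_TO_PROJECT.keys(), key=len, reverse=True), evaluated once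
lemma sortedKeys_eq : PySem.List.sorted pvTable.keys (fun p => p.length) true =
  ["icActS".toList, "icAcuD".toList, "bge".toList, "aag".toList, "ic".toList, "il".toList,
   "id".toList, "ia".toList, "iy".toList, "dr".toList, "ds".toList, "xb".toList, "ag".toList] := by
  decide

lemma toNat_ofNat_valid (n : Nat) (h : n.isValidChar) : (Char.ofNat n).toNat = n := by
  simp [Char.ofNat, h, Char.ofNatAux, Char.toNat]

-- a lowercased string never contains 'A' (kills the two mixed-case table keys on both sides)
lemma lower_no_A {l : List Char} (c : Char) (h : c ∈ PySem.Chars.lower l) : c ≠ 'A' := by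
  simp [PySem.Chars.lower] at h
  obtain ⟨d, _, rfl⟩ := h
  simp only [PySem.Chars.lowerChar]
  split_ifs with h1
  · simp [PySem.Chars.isupper, Char.le_def] at h1
    intro hc
    have h2 : (d.toNat + 32).isValidChar := by
      left
      have : d.toNat ≤ 90 := h1.2
      omega
    have := congrArg Char.toNat hc
    rw [toNat_ofNat_valid _ h2] at this
    have : d.toNat + 32 = 65 := this
    have h65 : 65 ≤ d.toNat := h1.1
    omega
  · rintro rfl
    exact h1 (by decide)

-- core equivalence of the two loops, on any lowercased input
set_option maxHeartbeats 8000000 in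
lemma scan_eq (l : List Char) (hA : ∀ c ∈ l, c ≠ 'A') :
    pvAScan l (PySem.List.sorted pvTable.keys (fun p => p.length) true) =
    pvBProbe l (PySem.List.pyRange (min (l.length : Int) (pvMaxKeyLen : Int)) 0 (-1)) := by
  rw [sortedKeys_eq]
  have hml : (pvMaxKeyLen : Int) = 6 := by decide
  rw [hml]
  rcases l with _|⟨a,_|⟨b,_|⟨c,_|⟨d,_|⟨e,_|⟨f,rest⟩⟩⟩⟩⟩⟩
  · decide
  · rw [show (([a].length : Int)) = 1 from by simp, show PySem.List.pyRange (min (1:Int) 6) 0 (-1) = [1] from by decide]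
    simp [pvAScan, pvBProbe, pvTable_eq, PySem.Chars.startswith, List.isPrefixOf,
          PySem.Dict.get?_mk_cons, get?_mk_nil, PySem.List.slice, PySem.List.clampIdx]
  · rw [show (([a,b].length : Int)) = 2 from by simp, show PySem.List.pyRange (min (2:Int) 6) 0 (-1) = [2,1] from by decide]
    simp [pvAScan, pvBProbe, pvTable_eq, PySem.Chars.startswith, List.isPrefixOf,
          PySem.Dict.get?_mk_cons, get?_mk_nil, PySem.List.slice, PySem.List.clampIdx]
    try (split_ifs <;> rfl)
  · rw [show (([a,b,c].length : Int)) = 3 from by simp, show PySem.List.pyRange (min (3:Int) 6) 0 (-1) = [3,2,1] from by decide]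
    simp [pvAScan, pvBProbe, pvTable_eq, PySem.Chars.startswith, List.isPrefixOf,
          PySem.Dict.get?_mk_cons, get?_mk_nil, PySem.List.slice, PySem.List.clampIdx]
    try (split_ifs <;> rfl)
  · rw [show (([a,b,c,d].length : Int)) = 4 from by simp, show PySem.List.pyRange (min (4:Int) 6) 0 (-1) = [4,3,2,1] from by decide]
    simp [pvAScan, pvBProbe, pvTable_eq, PySem.Chars.startswith, List.isPrefixOf,
          PySem.Dict.get?_mk_cons, get?_mk_nil, PySem.List.slice, PySem.List.clampIdx]
    try (split_ifs <;> rfl)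
  · rw [show (([a,b,c,d,e].length : Int)) = 5 from by simp, show PySem.List.pyRange (min (5:Int) 6) 0 (-1) = [5,4,3,2,1] from by decide]
    simp [pvAScan, pvBProbe, pvTable_eq, PySem.Chars.startswith, List.isPrefixOf,
          PySem.Dict.get?_mk_cons, get?_mk_nil, PySem.List.slice, PySem.List.clampIdx]
    try (split_ifs <;> rfl)
  · have hc' : ¬('A' = c) := fun h => (hA c (by simp)) h.symm
    have hm : min (((a::b::c::d::e::f::rest).length : Int)) 6 = 6 := by simp; omega
    rw [hm]
    rw [show PySem.List.pyRange 6 0 (-1) = [6,5,4,3,2,1] from by decide]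
    simp [pvAScan, pvBProbe, pvTable_eq, PySem.Chars.startswith, List.isPrefixOf,
          PySem.Dict.get?_mk_cons, get?_mk_nil, PySem.List.slice, PySem.List.clampIdx, hc']
    try (split_ifs <;> rfl)

-- ===== VERDICT (by name: the statement is the Claim_ definition above) =====
theorem infer_project_spec : Claim_equal_infer_project := by
  intro s _
  unfold Spec_infer_project infer_project infer_project_alt
  by_cases h : s.toList = []
  · simp [h]
  · simp only [h, if_false]
    rw [scan_eq (PySem.Chars.lower s.toList) (fun c hc => lower_no_A c hc)]
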